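-- pv_equiv track=rewrite | github.com/pavangururajan/InterviewPreparation | google/FindNlargestElementsInRowSortedMatrix.py | find_n_largest
-- ===== SOURCE A (Python) =====
-- from typing import List
-- import heapq
--
-- def find_n_largest(mat: List[List[int]], k: int):
--     maxheap = []
--     for i in range(len(mat)):
--         heapq.heappush(maxheap, (-mat[i][-1], i, len(mat[i])-1))
--
--     results = []
--     while maxheap and len(results) < k:
--         max_element, row, col = heapq.heappop(maxheap)
--         results.append(-max_element)
--         if col > 0:
--             heapq.heappush(maxheap, (-mat[row][col-1], row, col-1))
--     return results
-- ===== SOURCE B (Python) =====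
-- from typing import List
--
--
-- def find_n_largest(mat: List[List[int]], k: int):
--     ptrs = [len(row) - 1 for row in mat]
--     out = []
--     while len(out) < k:
--         best = -1
--         for i, p in enumerate(ptrs):
--             if p >= 0 and (best < 0 or mat[i][p] > mat[best][ptrs[best]]):
--                 best = i
--         if best < 0:
--             break
--         out.append(mat[best][ptrs[best]])
--         ptrs[best] -= 1
--     return out
-- ===== Notes on version B (the rewrite author's own statement) =====
-- stated objective: alternative
-- what changed: Replaces the heapq priority queue of negated (value,row,col) tuples by a plain per-row tail-pointer list with a linear argmax scan per emitted element; no heap, no tuple negation trick.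
import Mathlib
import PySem

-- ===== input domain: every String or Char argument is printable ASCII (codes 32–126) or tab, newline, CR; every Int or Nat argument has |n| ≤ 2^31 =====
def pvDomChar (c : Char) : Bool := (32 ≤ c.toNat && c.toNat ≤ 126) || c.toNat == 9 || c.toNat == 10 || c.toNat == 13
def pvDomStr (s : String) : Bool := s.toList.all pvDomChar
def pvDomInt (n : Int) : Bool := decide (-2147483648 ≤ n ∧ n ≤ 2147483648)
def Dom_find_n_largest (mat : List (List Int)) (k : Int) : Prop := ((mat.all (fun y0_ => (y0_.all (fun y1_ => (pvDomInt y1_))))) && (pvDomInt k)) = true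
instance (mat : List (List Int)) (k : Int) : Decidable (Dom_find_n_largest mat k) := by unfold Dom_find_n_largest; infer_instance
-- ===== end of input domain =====

-- B replaces A's heapq priority queue of negated tuples by per-row tail pointers with a
-- linear argmax scan per emitted element (objective: alternative; same return values).

-- shared Python-subscript helpers: mat[i] and xs[i] (Pre_ keeps them in range where used)
def pvGetRow (mat : List (List Int)) (i : Int) : List Int := (PySem.List.pyGet? mat i).getD []
def pvGetInt (xs : List Int) (i : Int) : Int := (PySem.List.pyGet? xs i).getD 0

-- ===== PORT A =====
-- lexicographic ≤ on the (-value, row, col) triples, exactly Python's tuple comparison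
def pvTle (a b : Int × Int × Int) : Bool :=
  a.1 < b.1 || (a.1 == b.1 && (a.2.1 < b.2.1 || (a.2.1 == b.2.1 && a.2.2 ≤ b.2.2)))

-- heapq.heappop: extract the minimal tuple; the heap list is kept as a plain list,
-- heappush appends (the position inside the list is irrelevant to pop's result)
def pvPopMin : Int × Int × Int → List (Int × Int × Int) → (Int × Int × Int) × List (Int × Int × Int)
  | x, [] => (x, [])
  | x, y :: ys =>
    let p := pvPopMin y ys
    if pvTle x p.1 then (x, y :: ys) else (p.1, x :: p.2)

-- fuel for A's while loop: one matrix element is consumed per iteration, so the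
-- weight pvMu of the initial heap bounds the iteration count (pvDec1/pvDec2 below)
def pvWgt (e : Int × Int × Int) : Nat := (e.2.2 + 1).toNat + 1
def pvMu (heap : List (Int × Int × Int)) : Nat := (heap.map pvWgt).sum

-- the while loop; max_element = (pvPopMin …).1.1, row = (pvPopMin …).1.2.1, col = (pvPopMin …).1.2.2
def pvLoopA (mat : List (List Int)) (k : Int) : Nat → List (Int × Int × Int) → List Int → List Int
  | 0, _, results => results
  | _ + 1, [], results => results
  | fuel + 1, x :: xs, results =>
    if (results.length : Int) < k then
      if (pvPopMin x xs).1.2.2 > 0 then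
        pvLoopA mat k fuel
          ((pvPopMin x xs).2 ++
            [(-(pvGetInt (pvGetRow mat (pvPopMin x xs).1.2.1) ((pvPopMin x xs).1.2.2 - 1)),
              (pvPopMin x xs).1.2.1, (pvPopMin x xs).1.2.2 - 1)])
          (results ++ [-(pvPopMin x xs).1.1])
      else
        pvLoopA mat k fuel (pvPopMin x xs).2 (results ++ [-(pvPopMin x xs).1.1])
    else results

def find_n_largest (mat : List (List Int)) (k : Int) : List Int :=
  let heap0 := (PySem.List.pyRange 0 mat.length 1).foldl
    (fun h i => h ++ [(-(pvGetInt (pvGetRow mat i) (-1)), i, ((pvGetRow mat i).length : Int) - 1)]) []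
  pvLoopA mat k (pvMu heap0) heap0 []

-- ===== PORT B =====
-- the body of B's 'for i, p in enumerate(ptrs)' argmax scan
def pvF (mat : List (List Int)) (ptrs : List Int) (best : Int) (pi : Int × Nat) : Int :=
  if 0 ≤ pi.1 ∧ (best < 0 ∨ pvGetInt (pvGetRow mat (pi.2 : Int)) pi.1 > pvGetInt (pvGetRow mat best) (pvGetInt ptrs best))
  then (pi.2 : Int) else best

def pvBest (mat : List (List Int)) (ptrs : List Int) : Int :=
  ptrs.zipIdx.foldl (pvF mat ptrs) (-1)

-- B's while loop; each iteration appends exactly one element, so len(out) < k makes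
-- k.toNat - len(out) a structural fuel
def pvLoopB (mat : List (List Int)) (k : Int) : Nat → List Int → List Int → List Int
  | 0, _, out => out
  | fuel + 1, ptrs, out =>
    if pvBest mat ptrs < 0 then out
    else
      pvLoopB mat k fuel
        (ptrs.set (pvBest mat ptrs).toNat (pvGetInt ptrs (pvBest mat ptrs) - 1))
        (out ++ [pvGetInt (pvGetRow mat (pvBest mat ptrs)) (pvGetInt ptrs (pvBest mat ptrs))])

def find_n_largest_alt (mat : List (List Int)) (k : Int) : List Int :=
  pvLoopB mat k k.toNat (mat.map (fun row => (row.length : Int) - 1)) []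

-- ===== PRECONDITION & SPEC =====
-- Pre_ excludes exactly the matrices containing an empty row, on which A raises
-- IndexError at mat[i][-1].
def Pre_find_n_largest (mat : List (List Int)) (k : Int) : Prop :=
  ∀ row ∈ mat, row ≠ []
instance (mat : List (List Int)) (k : Int) : Decidable (Pre_find_n_largest mat k) := by
  unfold Pre_find_n_largest; infer_instance

def pvWitness_find_n_largest : List (List Int) × Int := ([[1, 3], [4, 2]], 3)

def Spec_find_n_largest (mat : List (List Int)) (k : Int) (out : List Int) : Prop := out = find_n_largest_alt mat k
instance (mat : List (List Int)) (k : Int) (out : List Int) : Decidable (Spec_find_n_largest mat k out) := by unfold Spec_find_n_largest; infer_instance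

-- ===== CLAIM (what is proved, stated in full; the proofs are below) =====
def Claim_equal_find_n_largest : Prop := ∀ (mat : List (List Int)) (k : Int), Dom_find_n_largest mat k → Pre_find_n_largest mat k → Spec_find_n_largest mat k (find_n_largest mat k)

-- ===== LEMMAS AND PROOFS =====

theorem pvPopMin_perm (x : Int × Int × Int) (xs : List (Int × Int × Int)) :
    ((pvPopMin x xs).1 :: (pvPopMin x xs).2).Perm (x :: xs) := by
  induction xs generalizing x with
  | nil => simp [pvPopMin]
  | cons y ys ih =>
    simp only [pvPopMin]
    split
    · exact List.Perm.refl _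
    · exact (List.Perm.swap x (pvPopMin y ys).1 (pvPopMin y ys).2).trans ((ih y).cons x)

theorem pvPopMin_min (x : Int × Int × Int) (xs : List (Int × Int × Int)) :
    ∀ e ∈ x :: xs, pvTle (pvPopMin x xs).1 e = true := by
  induction xs generalizing x with
  | nil =>
    intro e he
    simp only [List.mem_singleton] at he
    subst he
    simp [pvPopMin, pvTle]
  | cons y ys ih =>
    intro e he
    simp only [pvPopMin]
    split
    · rename_i hle
      rcases List.mem_cons.1 he with rfl | hm
      · simp [pvTle]
      · have h2 := ih y e hm
        revert hle h2
        simp only [pvTle, Bool.or_eq_true, Bool.and_eq_true, decide_eq_true_eq, beq_iff_eq]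
        intro hle h2
        omega
    · rename_i hle
      rcases List.mem_cons.1 he with rfl | hm
      · revert hle
        simp only [pvTle, Bool.or_eq_true, Bool.and_eq_true, decide_eq_true_eq, beq_iff_eq]
        intro hle
        omega
      · exact ih y e hm

theorem pvTle_antisymm {a b : Int × Int × Int} (h1 : pvTle a b = true) (h2 : pvTle b a = true) :
    a = b := by
  obtain ⟨a1, a2, a3⟩ := a
  obtain ⟨b1, b2, b3⟩ := b
  simp only [pvTle, Bool.or_eq_true, Bool.and_eq_true, decide_eq_true_eq, beq_iff_eq] at h1 h2
  simp only [Prod.mk.injEq]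
  omega

theorem pvTle_refl (a : Int × Int × Int) : pvTle a a = true := by
  simp [pvTle]

theorem pvMu_perm {h₁ h₂ : List (Int × Int × Int)} (h : h₁.Perm h₂) : pvMu h₁ = pvMu h₂ :=
  List.Perm.sum_eq (h.map pvWgt)

theorem pvDec1 (x : Int × Int × Int) (xs : List (Int × Int × Int)) (a b : Int)
    (h : (pvPopMin x xs).1.2.2 > 0) :
    pvMu ((pvPopMin x xs).2 ++ [(a, b, (pvPopMin x xs).1.2.2 - 1)]) < pvMu (x :: xs) := by
  have hp := pvMu_perm (pvPopMin_perm x xs)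
  simp only [pvMu, List.map_cons, List.map_append, List.sum_append, List.sum_cons,
    List.map_nil, List.sum_nil, pvWgt] at hp ⊢
  omega

theorem pvDec2 (x : Int × Int × Int) (xs : List (Int × Int × Int)) :
    pvMu (pvPopMin x xs).2 < pvMu (x :: xs) := by
  have hp := pvMu_perm (pvPopMin_perm x xs)
  simp only [pvMu, List.map_cons, List.sum_cons, pvWgt] at hp ⊢
  omega

-- ---- subscript bridges ----

theorem pvGetInt_nat (xs : List Int) (n : Nat) : pvGetInt xs ((n : Nat) : Int) = xs.getD n 0 := by
  rw [pvGetInt, PySem.List.pyGet?_natCast]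
  rfl

theorem pvGetRow_nat {mat : List (List Int)} {n : Nat} (hn : n < mat.length) :
    pvGetRow mat ((n : Nat) : Int) = mat[n] := by
  rw [pvGetRow, PySem.List.pyGet?_natCast, List.getElem?_eq_getElem hn]
  rfl

theorem pvGetInt_neg_one {row : List Int} (h : 0 < row.length) :
    pvGetInt row (-1) = pvGetInt row ((row.length : Int) - 1) := by
  have h1 : PySem.List.pyIdx? row.length (-1) = some (row.length - 1) := by
    unfold PySem.List.pyIdx?
    rw [if_neg (by omega), if_pos (by omega)]
    norm_num
  have h2 : PySem.List.pyIdx? row.length ((row.length : Int) - 1) = some (row.length - 1) := by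
    unfold PySem.List.pyIdx?
    rw [if_pos (by omega), if_pos (by omega)]
    congr 1
    omega
  rw [pvGetInt, pvGetInt, PySem.List.pyGet?, PySem.List.pyGet?, h1, h2]

theorem pvGetD_set_self {l : List Int} {n : Nat} {a : Int} (h : n < l.length) :
    (l.set n a).getD n 0 = a := by
  rw [List.getD_eq_getElem _ _ (by simpa using h)]
  simp

theorem pvGetD_set_ne {l : List Int} {n m : Nat} {a : Int} (h : m ≠ n) :
    (l.set n a).getD m 0 = l.getD m 0 := by
  by_cases hm : m < l.length
  · rw [List.getD_eq_getElem _ _ (by simpa using hm), List.getD_eq_getElem _ _ hm]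
    simp [List.getElem_set_ne (Ne.symm h)]
  · rw [List.getD_eq_default _ _ (by simpa using not_lt.1 hm),
      List.getD_eq_default _ _ (by omega)]

-- ---- the abstract frontier: which rows are active, their values, their heap entries ----

def pvAct (ptrs : List Int) (i : Nat) : Bool :=
  decide (i < ptrs.length) && decide (0 ≤ ptrs.getD i 0)

def pvVal (mat : List (List Int)) (ptrs : List Int) (i : Nat) : Int :=
  pvGetInt (pvGetRow mat (i : Int)) (ptrs.getD i 0)

def pvEnt (mat : List (List Int)) (ptrs : List Int) (i : Nat) : Int × Int × Int :=
  (-(pvVal mat ptrs i), (i : Int), ptrs.getD i 0)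

def pvActive (ptrs : List Int) : List Nat :=
  (List.range ptrs.length).filter (pvAct ptrs)

def pvCanon (mat : List (List Int)) (ptrs : List Int) : List (Int × Int × Int) :=
  (pvActive ptrs).map (pvEnt mat ptrs)

-- ---- characterisation of pvBest: first argmax over active rows ----

def pvQ (mat : List (List Int)) (ptrs : List Int) (m : Nat) (b : Int) : Prop :=
  (b = -1 ∧ ∀ i, i < m → pvAct ptrs i = false) ∨
  (∃ nb : Nat, b = (nb : Int) ∧ nb < m ∧ pvAct ptrs nb = true ∧
    (∀ i, i < m → pvAct ptrs i = true → pvVal mat ptrs i ≤ pvVal mat ptrs nb) ∧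
    (∀ i, i < nb → pvAct ptrs i = true → pvVal mat ptrs i < pvVal mat ptrs nb))

theorem pvQ_of_le {mat : List (List Int)} {ptrs : List Int} {m m' : Nat} {b : Int}
    (h : m' ≤ m) (hq : pvQ mat ptrs m b)
    (hm : ∀ i, pvAct ptrs i = true → i < m') : pvQ mat ptrs m' b := by
  rcases hq with ⟨hb, hall⟩ | ⟨nb, hb, hnb, hact, hmax, hstrict⟩
  · exact Or.inl ⟨hb, fun i hi => hall i (by omega)⟩
  · exact Or.inr ⟨nb, hb, hm nb hact, hact, fun i hi ha => hmax i (by omega) ha, hstrict⟩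

theorem pvQ_step (mat : List (List Int)) (ptrs : List Int) (j : Nat) (b : Int)
    (hj : j < ptrs.length) (hq : pvQ mat ptrs j b) :
    pvQ mat ptrs (j + 1) (pvF mat ptrs b (ptrs.getD j 0, j)) := by
  have hvj : pvGetInt (pvGetRow mat ((j : Nat) : Int)) (ptrs.getD j 0) = pvVal mat ptrs j := rfl
  rw [pvF]
  rcases hq with ⟨hb, hall⟩ | ⟨nb, hb, hnb, hact, hmax, hstrict⟩
  · split
    · rename_i hcond
      refine Or.inr ⟨j, rfl, by omega, ?_, ?_, ?_⟩
      · simp only [pvAct, Bool.and_eq_true, decide_eq_true_eq]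
        exact ⟨hj, hcond.1⟩
      · intro i hi ha
        rcases Nat.lt_or_ge i j with h | h
        · exact absurd ha (by simp [hall i h])
        · have hij : i = j := by omega
          subst hij; exact le_refl _
      · intro i hi ha
        exact absurd ha (by simp [hall i hi])
    · rename_i hcond
      refine Or.inl ⟨hb, fun i hi => ?_⟩
      rcases Nat.lt_or_ge i j with h | h
      · exact hall i h
      · have hij : i = j := by omega
        subst hij
        simp only [pvAct]
        rw [not_and_or] at hcond
        rcases hcond with h1 | h2
        · simp only [Bool.and_eq_false_iff, decide_eq_false_iff_not]
          right; omega
        · exact absurd (Or.inl (by rw [hb]; omega)) h2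
  · subst hb
    have hbv : pvGetInt (pvGetRow mat ((nb : Nat) : Int)) (pvGetInt ptrs ((nb : Nat) : Int))
        = pvVal mat ptrs nb := by
      rw [pvGetInt_nat]; rfl
    split
    · rename_i hcond
      obtain ⟨hj0, hcmp⟩ := hcond
      have hgt : pvVal mat ptrs nb < pvVal mat ptrs j := by
        rcases hcmp with h | h
        · exfalso; omega
        · rw [hvj, hbv] at h; exact h
      refine Or.inr ⟨j, rfl, by omega, ?_, ?_, ?_⟩
      · simp only [pvAct, Bool.and_eq_true, decide_eq_true_eq]
        exact ⟨hj, hj0⟩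
      · intro i hi ha
        rcases Nat.lt_or_ge i j with h | h
        · exact le_of_lt (lt_of_le_of_lt (hmax i h ha) hgt)
        · have hij : i = j := by omega
          subst hij; exact le_refl _
      · intro i hi ha
        exact lt_of_le_of_lt (hmax i hi ha) hgt
    · rename_i hcond
      have hle : pvAct ptrs j = false ∨ pvVal mat ptrs j ≤ pvVal mat ptrs nb := by
        rw [not_and_or] at hcond
        rcases hcond with h1 | h2
        · left
          simp only [pvAct, Bool.and_eq_false_iff, decide_eq_false_iff_not]
          right; omega
        · right
          rw [not_or] at h2
          have h3 := h2.2
          rw [hvj, hbv] at h3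
          omega
      refine Or.inr ⟨nb, rfl, by omega, hact, ?_, hstrict⟩
      intro i hi ha
      rcases Nat.lt_or_ge i j with h | h
      · exact hmax i h ha
      · have hij : i = j := by omega
        subst hij
        rcases hle with h1 | h1
        · rw [h1] at ha; exact absurd ha (by simp)
        · exact h1

theorem pvQ_fold (mat : List (List Int)) (ptrs : List Int) :
    ∀ (n j : Nat) (b : Int), ptrs.length - j ≤ n → pvQ mat ptrs j b →
      pvQ mat ptrs ptrs.length (((ptrs.drop j).zipIdx j).foldl (pvF mat ptrs) b) := by
  intro n
  induction n with
  | zero =>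
    intro j b hn hq
    have hj : ptrs.length ≤ j := by omega
    rw [List.drop_eq_nil_of_le hj]
    exact pvQ_of_le hj hq (fun i ha => by
      simp only [pvAct, Bool.and_eq_true, decide_eq_true_eq] at ha; omega)
  | succ n ih =>
    intro j b hn hq
    by_cases hj : j < ptrs.length
    · rw [List.drop_eq_getElem_cons hj, List.zipIdx_cons, List.foldl_cons]
      have hx : ptrs[j] = ptrs.getD j 0 := (List.getD_eq_getElem _ _ hj).symm
      rw [hx]
      exact ih (j + 1) _ (by omega) (pvQ_step mat ptrs j b hj hq)
    · rw [List.drop_eq_nil_of_le (by omega)]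
      exact pvQ_of_le (by omega) hq (fun i ha => by
        simp only [pvAct, Bool.and_eq_true, decide_eq_true_eq] at ha; omega)

theorem pvBest_spec (mat : List (List Int)) (ptrs : List Int) :
    pvQ mat ptrs ptrs.length (pvBest mat ptrs) := by
  have h0 : pvQ mat ptrs 0 (-1) := Or.inl ⟨rfl, fun i hi => by omega⟩
  have h := pvQ_fold mat ptrs ptrs.length 0 (-1) (by omega) h0
  simpa [pvBest, List.drop_zero] using h

-- ---- canon manipulation ----

theorem pvActive_nodup (ptrs : List Int) : (pvActive ptrs).Nodup :=
  (List.nodup_range).filter _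

theorem pvMem_active {ptrs : List Int} {i : Nat} :
    i ∈ pvActive ptrs ↔ pvAct ptrs i = true := by
  constructor
  · intro h
    exact (List.mem_filter.1 h).2
  · intro h
    refine List.mem_filter.2 ⟨List.mem_range.2 ?_, h⟩
    simp only [pvAct, Bool.and_eq_true, decide_eq_true_eq] at h
    omega

theorem pvFilter_erase {l : List Nat} (hl : l.Nodup) {p q : Nat → Bool} {b : Nat} (hb : b ∈ l)
    (hq : ∀ i ∈ l, i ≠ b → q i = p i) (hqb : q b = false) :
    l.filter q = (l.filter p).erase b := by
  induction l with
  | nil => cases hb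
  | cons a t ih =>
    rcases List.mem_cons.1 hb with hba | hbt
    · subst hba
      have hbt : b ∉ t := (List.nodup_cons.1 hl).1
      have hqt : t.filter q = t.filter p :=
        List.filter_congr (fun i hi => hq i (List.mem_cons_of_mem _ hi) (fun h => hbt (h ▸ hi)))
      rw [List.filter_cons, List.filter_cons, if_neg (by simp [hqb]), hqt]
      by_cases hpa : p b = true
      · rw [if_pos (by simp [hpa]), List.erase_cons_head]
      · rw [if_neg (by simp [hpa]),
          List.erase_of_not_mem (fun h => hbt (List.mem_of_mem_filter h))]
    · have hne : a ≠ b := fun h => (List.nodup_cons.1 hl).1 (h ▸ hbt)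
      have hqa : q a = p a := hq a List.mem_cons_self hne
      have iht := ih (List.nodup_cons.1 hl).2 hbt
        (fun i hi hib => hq i (List.mem_cons_of_mem _ hi) hib)
      rw [List.filter_cons, List.filter_cons, hqa]
      by_cases hpa : p a = true
      · rw [if_pos (by simp [hpa]), if_pos (by simp [hpa]),
          List.erase_cons_tail (by simp [hne]), iht]
      · rw [if_neg (by simp [hpa]), if_neg (by simp [hpa]), iht]

theorem pvLoopB_stuck (mat : List (List Int)) (k : Int) (fuel : Nat) (ptrs out : List Int)
    (h : pvBest mat ptrs = -1) : pvLoopB mat k fuel ptrs out = out := by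
  cases fuel with
  | zero => rfl
  | succ fuel => rw [pvLoopB, if_pos (by rw [h]; norm_num)]

theorem pvCanon_eq_nil {mat : List (List Int)} {ptrs : List Int}
    (h : pvCanon mat ptrs = []) : pvBest mat ptrs = -1 := by
  have hact : ∀ i, pvAct ptrs i = false := by
    intro i
    by_contra hi
    have hmem : i ∈ pvActive ptrs := pvMem_active.2 (by simpa using hi)
    rw [pvCanon, List.map_eq_nil_iff] at h
    rw [h] at hmem
    cases hmem
  rcases pvBest_spec mat ptrs with ⟨hb, _⟩ | ⟨nb, _, _, hnb, _⟩
  · exact hb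
  · rw [hact nb] at hnb; cases hnb

theorem pvStep_main (mat : List (List Int)) (ptrs : List Int)
    (x : Int × Int × Int) (xs : List (Int × Int × Int))
    (hperm : (x :: xs).Perm (pvCanon mat ptrs)) :
    ∃ nb : Nat, pvBest mat ptrs = (nb : Int) ∧ nb < ptrs.length ∧ 0 ≤ ptrs.getD nb 0 ∧
      (pvPopMin x xs).1 = pvEnt mat ptrs nb ∧
      (pvPopMin x xs).2.Perm (((pvActive ptrs).erase nb).map (pvEnt mat ptrs)) := by
  rcases pvBest_spec mat ptrs with ⟨_, hall⟩ | ⟨nb, hb, hnb, hact, hmax, hstrict⟩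
  case inl =>
    exfalso
    have hcn : pvCanon mat ptrs = [] := by
      rw [pvCanon, pvActive]
      have hf : (List.range ptrs.length).filter (pvAct ptrs) = [] := by
        apply List.filter_eq_nil_iff.2
        intro a ha
        simp [hall a (List.mem_range.1 ha)]
      rw [hf]; rfl
    rw [hcn] at hperm
    exact absurd hperm.length_eq (by simp)
  have hnb' : nb < ptrs.length := by
    simp only [pvAct, Bool.and_eq_true, decide_eq_true_eq] at hact
    exact hact.1
  have hge : 0 ≤ ptrs.getD nb 0 := by
    simp only [pvAct, Bool.and_eq_true, decide_eq_true_eq] at hact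
    exact hact.2
  have hleall : ∀ e ∈ pvCanon mat ptrs, pvTle (pvEnt mat ptrs nb) e = true := by
    intro e he
    obtain ⟨i, hi, rfl⟩ := List.mem_map.1 he
    have hiact : pvAct ptrs i = true := pvMem_active.1 hi
    have hile : i < ptrs.length := by
      simp only [pvAct, Bool.and_eq_true, decide_eq_true_eq] at hiact
      exact hiact.1
    have hvle : pvVal mat ptrs i ≤ pvVal mat ptrs nb := hmax i hile hiact
    by_cases hlt : pvVal mat ptrs i < pvVal mat ptrs nb
    · simp only [pvEnt, pvTle, Bool.or_eq_true, Bool.and_eq_true, decide_eq_true_eq, beq_iff_eq]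
      omega
    · have heq : pvVal mat ptrs i = pvVal mat ptrs nb := by omega
      have hge2 : nb ≤ i := by
        by_contra hni
        exact absurd heq (ne_of_lt (hstrict i (by omega) hiact))
      rcases Nat.eq_or_lt_of_le hge2 with rfl | hltn
      · exact pvTle_refl _
      · simp only [pvEnt, pvTle, Bool.or_eq_true, Bool.and_eq_true, decide_eq_true_eq, beq_iff_eq]
        have hc : (nb : Int) < (i : Int) := by exact_mod_cast hltn
        omega
  have hmem : pvEnt mat ptrs nb ∈ pvCanon mat ptrs :=
    List.mem_map.2 ⟨nb, pvMem_active.2 hact, rfl⟩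
  have hpop_mem : (pvPopMin x xs).1 ∈ pvCanon mat ptrs :=
    hperm.mem_iff.1 ((pvPopMin_perm x xs).mem_iff.1 List.mem_cons_self)
  have hent_mem : pvEnt mat ptrs nb ∈ x :: xs := hperm.mem_iff.2 hmem
  have heq : (pvPopMin x xs).1 = pvEnt mat ptrs nb :=
    pvTle_antisymm (pvPopMin_min x xs _ hent_mem) (hleall _ hpop_mem)
  refine ⟨nb, hb, hnb', hge, heq, ?_⟩
  have h1 : (pvCanon mat ptrs).Perm
      (pvEnt mat ptrs nb :: ((pvActive ptrs).erase nb).map (pvEnt mat ptrs)) :=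
    (List.perm_cons_erase (pvMem_active.2 hact)).map (pvEnt mat ptrs)
  have h2 : ((pvPopMin x xs).1 :: (pvPopMin x xs).2).Perm
      (pvEnt mat ptrs nb :: ((pvActive ptrs).erase nb).map (pvEnt mat ptrs)) :=
    ((pvPopMin_perm x xs).trans hperm).trans h1
  rw [heq] at h2
  exact h2.cons_inv

theorem pvCanon_update (mat : List (List Int)) (ptrs : List Int) (nb : Nat)
    (hnb : nb < ptrs.length) (hact : 0 ≤ ptrs.getD nb 0) :
    (pvCanon mat (ptrs.set nb (ptrs.getD nb 0 - 1))).Perm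
      ((if 0 < ptrs.getD nb 0 then [pvEnt mat (ptrs.set nb (ptrs.getD nb 0 - 1)) nb] else []) ++
        ((pvActive ptrs).erase nb).map (pvEnt mat ptrs)) := by
  set c := ptrs.getD nb 0 with hc
  set ptrs' := ptrs.set nb (c - 1) with hp'
  have hlen' : ptrs'.length = ptrs.length := by rw [hp', List.length_set]
  have hgd_ne : ∀ i, i ≠ nb → ptrs'.getD i 0 = ptrs.getD i 0 := fun i hi => pvGetD_set_ne hi
  have hgd_nb : ptrs'.getD nb 0 = c - 1 := pvGetD_set_self hnb
  have hact_ne : ∀ i, i ≠ nb → pvAct ptrs' i = pvAct ptrs i := by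
    intro i hi
    simp only [pvAct, hlen', hgd_ne i hi]
  have hent_ne : ∀ i, i ≠ nb → pvEnt mat ptrs' i = pvEnt mat ptrs i := by
    intro i hi
    simp only [pvEnt, pvVal, hgd_ne i hi]
  have herase : ∀ i ∈ (pvActive ptrs).erase nb, i ≠ nb := by
    intro i hi
    exact ((List.Nodup.mem_erase_iff (pvActive_nodup ptrs)).1 hi).1
  have hmapK : (((pvActive ptrs).erase nb).map (pvEnt mat ptrs'))
      = ((pvActive ptrs).erase nb).map (pvEnt mat ptrs) :=
    List.map_congr_left (fun i hi => hent_ne i (herase i hi))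
  by_cases hcpos : 0 < c
  · rw [if_pos hcpos]
    have hactive' : pvActive ptrs' = pvActive ptrs := by
      rw [pvActive, pvActive, hlen']
      apply List.filter_congr
      intro i _
      by_cases hi : i = nb
      · subst hi
        simp only [pvAct, hlen', hgd_nb, ← hc]
        have h1 : decide (0 ≤ c - 1) = true := by simp; omega
        have h2 : decide (0 ≤ c) = true := by simp; omega
        rw [h1, h2]
      · exact hact_ne i hi
    have h1 : (pvCanon mat ptrs').Perm
        (pvEnt mat ptrs' nb :: ((pvActive ptrs).erase nb).map (pvEnt mat ptrs')) := by
      have hmem : nb ∈ pvActive ptrs := pvMem_active.2 (by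
        simp only [pvAct, Bool.and_eq_true, decide_eq_true_eq]
        exact ⟨hnb, hact⟩)
      have hce := (List.perm_cons_erase hmem).map (pvEnt mat ptrs')
      rw [pvCanon, hactive']
      exact hce
    rw [hmapK] at h1
    simpa using h1
  · rw [if_neg hcpos]
    have hactive' : pvActive ptrs' = (pvActive ptrs).erase nb := by
      rw [pvActive, pvActive, hlen']
      apply pvFilter_erase List.nodup_range (List.mem_range.2 hnb)
      · intro i _ hi
        exact hact_ne i hi
      · simp only [pvAct, hlen', hgd_nb]
        simp only [Bool.and_eq_false_iff, decide_eq_false_iff_not]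
        right; omega
    rw [List.nil_append, pvCanon, hactive', hmapK]

theorem pvLoop_eq (mat : List (List Int)) (k : Int) :
    ∀ (fuelA : Nat) (heap : List (Int × Int × Int)) (ptrs : List Int) (out : List Int),
      pvMu heap ≤ fuelA →
      heap.Perm (pvCanon mat ptrs) →
      pvLoopA mat k fuelA heap out = pvLoopB mat k (k.toNat - out.length) ptrs out := by
  intro fuelA
  induction fuelA with
  | zero =>
    intro heap ptrs out hmu hperm
    match heap with
    | [] =>
      rw [pvLoopA]
      have hcn : pvCanon mat ptrs = [] := by
        have hl := hperm.length_eq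
        simp only [List.length_nil] at hl
        exact List.eq_nil_of_length_eq_zero hl.symm
      exact (pvLoopB_stuck mat k _ ptrs out (pvCanon_eq_nil hcn)).symm
    | x :: xs =>
      exfalso
      simp only [pvMu, List.map_cons, List.sum_cons, pvWgt] at hmu
      omega
  | succ fuelA ih =>
    intro heap ptrs out hmu hperm
    match heap with
    | [] =>
      rw [pvLoopA]
      have hcn : pvCanon mat ptrs = [] := by
        have hl := hperm.length_eq
        simp only [List.length_nil] at hl
        exact List.eq_nil_of_length_eq_zero hl.symm
      exact (pvLoopB_stuck mat k _ ptrs out (pvCanon_eq_nil hcn)).symm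
    | x :: xs =>
      obtain ⟨nb, hbest, hnb, hge, hpop, hrest⟩ := pvStep_main mat ptrs x xs hperm
      rw [pvLoopA]
      rcases Nat.eq_zero_or_pos (k.toNat - out.length) with hfb | hfb
      · rw [hfb, if_neg (show ¬ (out.length : Int) < k by omega)]
        rfl
      · obtain ⟨fb, hfb'⟩ : ∃ fb, k.toNat - out.length = fb + 1 :=
          ⟨k.toNat - out.length - 1, by omega⟩
        rw [hfb', if_pos (show (out.length : Int) < k by omega)]
        rw [pvLoopB, if_neg (show ¬ pvBest mat ptrs < 0 by rw [hbest]; omega)]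
        have hb1 : (pvBest mat ptrs).toNat = nb := by rw [hbest]; exact Int.toNat_natCast nb
        have hb2 : pvGetInt ptrs (pvBest mat ptrs) = ptrs.getD nb 0 := by
          rw [hbest, pvGetInt_nat]
        have hb3 : pvGetInt (pvGetRow mat (pvBest mat ptrs)) (pvGetInt ptrs (pvBest mat ptrs))
            = pvVal mat ptrs nb := by
          rw [hbest, pvGetInt_nat]; rfl
        rw [hb3, hb1, hb2]
        have hv : -(pvPopMin x xs).1.1 = pvVal mat ptrs nb := by
          rw [hpop]; simp [pvEnt]
        have hcup := pvCanon_update mat ptrs nb hnb hge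
        have hout : (out ++ [pvVal mat ptrs nb]).length = out.length + 1 := by
          simp
        by_cases hcpos : (pvPopMin x xs).1.2.2 > 0
        · rw [if_pos hcpos]
          rw [hv]
          have hc2 : (pvPopMin x xs).1.2.2 = ptrs.getD nb 0 := by rw [hpop]; rfl
          have hnew : (-(pvGetInt (pvGetRow mat (pvPopMin x xs).1.2.1) ((pvPopMin x xs).1.2.2 - 1)),
              (pvPopMin x xs).1.2.1, (pvPopMin x xs).1.2.2 - 1)
              = pvEnt mat (ptrs.set nb (ptrs.getD nb 0 - 1)) nb := by
            rw [hpop]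
            simp only [pvEnt, pvVal]
            rw [pvGetD_set_self hnb]
          have hmu' : pvMu ((pvPopMin x xs).2 ++
              [(-(pvGetInt (pvGetRow mat (pvPopMin x xs).1.2.1) ((pvPopMin x xs).1.2.2 - 1)),
                (pvPopMin x xs).1.2.1, (pvPopMin x xs).1.2.2 - 1)]) ≤ fuelA := by
            have hd := pvDec1 x xs
              (-(pvGetInt (pvGetRow mat (pvPopMin x xs).1.2.1) ((pvPopMin x xs).1.2.2 - 1)))
              (pvPopMin x xs).1.2.1 hcpos
            omega
          have hperm' : ((pvPopMin x xs).2 ++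
              [(-(pvGetInt (pvGetRow mat (pvPopMin x xs).1.2.1) ((pvPopMin x xs).1.2.2 - 1)),
                (pvPopMin x xs).1.2.1, (pvPopMin x xs).1.2.2 - 1)]).Perm
              (pvCanon mat (ptrs.set nb (ptrs.getD nb 0 - 1))) := by
            rw [hnew]
            refine List.Perm.trans ?_ hcup.symm
            rw [if_pos (show 0 < ptrs.getD nb 0 by omega)]
            exact (List.perm_append_singleton _ _).trans (hrest.cons _)
          have hrec := ih _ (ptrs.set nb (ptrs.getD nb 0 - 1)) (out ++ [pvVal mat ptrs nb])
            hmu' hperm'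
          rw [hrec, hout]
          congr 1
          omega
        · rw [if_neg hcpos]
          rw [hv]
          have hc2 : (pvPopMin x xs).1.2.2 = ptrs.getD nb 0 := by rw [hpop]; rfl
          have hperm' : ((pvPopMin x xs).2).Perm
              (pvCanon mat (ptrs.set nb (ptrs.getD nb 0 - 1))) := by
            refine List.Perm.trans ?_ hcup.symm
            rw [if_neg (show ¬ 0 < ptrs.getD nb 0 by omega), List.nil_append]
            exact hrest
          have hmu' : pvMu (pvPopMin x xs).2 ≤ fuelA := by
            have hd := pvDec2 x xs
            omega
          have hrec := ih _ (ptrs.set nb (ptrs.getD nb 0 - 1)) (out ++ [pvVal mat ptrs nb])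
            hmu' hperm'
          rw [hrec, hout]
          congr 1
          omega

theorem pvInit (mat : List (List Int)) (hpre : ∀ row ∈ mat, row ≠ []) :
    ((PySem.List.pyRange 0 mat.length 1).foldl
      (fun h i => h ++ [(-(pvGetInt (pvGetRow mat i) (-1)), i, ((pvGetRow mat i).length : Int) - 1)]) []).Perm
      (pvCanon mat (mat.map (fun row => (row.length : Int) - 1))) := by
  rw [PySem.List.foldl_append_singleton_eq_map, PySem.List.pyRange_zero_natCast, List.nil_append,
    List.map_map]
  set ptrs0 := mat.map (fun row => (row.length : Int) - 1) with hp0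
  have hgd0 : ∀ i, i < mat.length → ptrs0.getD i 0 = ((pvGetRow mat ((i : Nat) : Int)).length : Int) - 1 := by
    intro i hi
    rw [hp0, List.getD_eq_getElem _ _ (by simpa using hi), List.getElem_map,
      pvGetRow_nat hi]
  have hpos : ∀ i, (hi : i < mat.length) → 0 < (mat[i]'hi).length := by
    intro i hi
    exact List.length_pos_iff.2 (hpre _ (List.getElem_mem hi))
  have hactive0 : pvActive ptrs0 = List.range mat.length := by
    rw [pvActive, hp0, List.length_map, ← hp0]
    apply List.filter_eq_self.2
    intro i hi
    have hi' := List.mem_range.1 hi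
    simp only [pvAct, Bool.and_eq_true, decide_eq_true_eq]
    refine ⟨by rw [hp0, List.length_map]; omega, ?_⟩
    rw [hgd0 i hi', pvGetRow_nat hi']
    have hp := hpos i hi'
    omega
  rw [pvCanon, hactive0]
  apply List.Perm.of_eq
  apply List.map_congr_left
  intro i hi
  have hi' := List.mem_range.1 hi
  simp only [Function.comp]
  rw [pvEnt, pvVal, hgd0 i hi']
  have hrowpos : 0 < (pvGetRow mat ((i : Nat) : Int)).length := by
    rw [pvGetRow_nat hi']; exact hpos i hi'
  rw [pvGetInt_neg_one hrowpos]

-- ===== VERDICT (by name: the statement is the Claim_ definition above) =====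
set_option maxHeartbeats 1000000 in
theorem find_n_largest_spec : Claim_equal_find_n_largest := by
  intro mat k _ hpre
  unfold Spec_find_n_largest find_n_largest find_n_largest_alt
  exact pvLoop_eq mat k _ _ (mat.map (fun row => (row.length : Int) - 1)) []
    (le_refl _) (pvInit mat hpre)
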